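-- pv_equiv track=rewrite | github.com/Gusta2307/MRI | doc_bd.py | frec_ij
-- ===== SOURCE A (Python) =====
-- def frec_ij(terms, dic):
--     result = []
--     matriz = []
--     for key in dic.keys():
--         temp = []
--         temp_row = []
--         for term in terms:
--             ocurr_temp = 0
--             for t,o in dic[key]:
--                 if term == t:
--                     ocurr_temp = o
--                     break
--             temp.append(ocurr_temp)
--             temp_row.append(1 if ocurr_temp > 0 else 0)
--         matriz.append(temp_row)
--         result.append(temp)
--     return result, matriz
-- ===== SOURCE B (Python) =====
-- def frec_ij(terms, dic):
--     # Different algorithm: scatter instead of gather.  Index the term columns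
--     # once (term -> list of column positions), then for each document start
--     # from a zero row and scatter each posting's count into its columns,
--     # iterating the postings in reverse so the FIRST occurrence wins (matching
--     # A's first-match scan).  The incidence matrix is derived from the computed
--     # frequency matrix in a separate pass.
--     cols = {}
--     for j, term in enumerate(terms):
--         cols[term] = cols.get(term, []) + [j]
--     result = []
--     for pairs in dic.values():
--         row = [0] * len(terms)
--         for t, o in reversed(pairs):
--             for j in cols.get(t, []):
--                 row[j] = o
--         result.append(row)
--     matriz = [[1 if o > 0 else 0 for o in row] for row in result]
--     return result, matriz
-- ===== Notes on version B (the rewrite author's own statement) =====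
-- stated objective: faster
-- what changed: B inverts the traversal: it indexes term columns once, then builds each row by scattering postings (in reverse, so the first occurrence wins) into a preallocated zero row, instead of A's per-term linear re-scan of dic[key]; the incidence matrix is derived from the finished frequency matrix in a separate pass.
import Mathlib
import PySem

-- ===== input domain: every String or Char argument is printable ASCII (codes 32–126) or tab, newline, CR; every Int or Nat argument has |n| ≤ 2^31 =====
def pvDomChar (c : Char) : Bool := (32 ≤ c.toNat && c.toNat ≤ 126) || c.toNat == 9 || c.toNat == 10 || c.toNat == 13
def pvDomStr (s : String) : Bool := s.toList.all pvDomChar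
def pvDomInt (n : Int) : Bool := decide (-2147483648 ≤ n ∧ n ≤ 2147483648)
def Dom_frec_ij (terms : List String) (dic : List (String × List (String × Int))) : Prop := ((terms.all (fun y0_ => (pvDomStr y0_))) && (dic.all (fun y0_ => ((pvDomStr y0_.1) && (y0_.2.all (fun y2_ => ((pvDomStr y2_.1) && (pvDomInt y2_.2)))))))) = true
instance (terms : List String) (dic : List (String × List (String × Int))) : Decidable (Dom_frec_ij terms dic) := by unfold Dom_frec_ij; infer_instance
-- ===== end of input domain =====

-- B inverts the traversal: a term→columns index built once, each row produced by
-- scattering postings (in reverse, so the first occurrence wins) into a zero row,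
-- and the incidence matrix derived from the finished frequency matrix (objective: faster).

-- ===== PORT A =====
-- inner 'for t,o in dic[key]: if term == t: ocurr_temp = o; break' (starting from ocurr_temp = 0)
def frecScanA (pairs : List (String × Int)) (term : String) : Int :=
  match pairs with
  | [] => 0
  | (t, o) :: rest => if term == t then o else frecScanA rest term

def frec_ij (terms : List String) (dic : List (String × List (String × Int))) : List (List Int) × List (List Int) :=
  let d := PySem.Dict.ofList dic
  d.keys.foldl (fun (rm : List (List Int) × List (List Int)) key =>
    let tt := terms.foldl (fun (tt : List Int × List Int) term =>
      let ocurr := frecScanA (d.getD key []) term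
      (tt.1 ++ [ocurr], tt.2 ++ [if ocurr > 0 then (1 : Int) else 0])) ([], [])
    (rm.1 ++ [tt.1], rm.2 ++ [tt.2])) ([], [])

-- ===== PORT B =====
-- 'cols = {}; for j, term in enumerate(terms): cols[term] = cols.get(term, []) + [j]'
def colsB (terms : List String) : PySem.Dict String (List Int) :=
  (PySem.List.enumerate terms).foldl (fun d p => d.modify p.2 [] (· ++ [p.1])) PySem.Dict.empty

-- 'row = [0]*len(terms); for t,o in reversed(pairs): for j in cols.get(t, []): row[j] = o'
def scatterB (cols : PySem.Dict String (List Int)) (n : Nat) (pairs : List (String × Int)) : List Int :=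
  pairs.reverse.foldl (fun row p =>
    (cols.getD p.1 []).foldl (fun r j => PySem.List.pySetD r j p.2) row) (List.replicate n 0)

def frec_ij_alt (terms : List String) (dic : List (String × List (String × Int))) : List (List Int) × List (List Int) :=
  let cols := colsB terms
  let d := PySem.Dict.ofList dic
  let result := d.values.foldl (fun (r : List (List Int)) pairs =>
    r ++ [scatterB cols terms.length pairs]) []
  let matriz := result.map (fun row => row.map (fun o => if o > 0 then (1 : Int) else 0))
  (result, matriz)

-- ===== PRECONDITION & SPEC =====
def Spec_frec_ij (terms : List String) (dic : List (String × List (String × Int))) (out : List (List Int) × List (List Int)) : Prop := out = frec_ij_alt terms dic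
instance (terms : List String) (dic : List (String × List (String × Int))) (out : List (List Int) × List (List Int)) : Decidable (Spec_frec_ij terms dic out) := by unfold Spec_frec_ij; infer_instance

-- ===== CLAIM (what is proved, stated in full; the proofs are below) =====
def Claim_equal_frec_ij : Prop := ∀ (terms : List String) (dic : List (String × List (String × Int))), Dom_frec_ij terms dic → Spec_frec_ij terms dic (frec_ij terms dic)

-- ===== LEMMAS AND PROOFS =====

-- the cols index: lookup at t is the list of (cast) positions of t in terms
theorem colsB_getD_aux (t : String) (l : List (Int × String)) (d : PySem.Dict String (List Int)) :
    (l.foldl (fun d p => d.modify p.2 [] (· ++ [p.1])) d).getD t []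
      = d.getD t [] ++ (l.filter (fun p => p.2 == t)).map (·.1) := by
  induction l generalizing d with
  | nil => simp
  | cons p rest ih =>
    simp only [List.foldl_cons, ih, List.filter_cons]
    by_cases h : p.2 = t
    · simp [h]
    · simp [PySem.Dict.getD_modify, h, Ne.symm h]

theorem mem_colsB (terms : List String) (t : String) (j : Int) :
    j ∈ (colsB terms).getD t []
      ↔ ∃ (k : Nat) (h : k < terms.length), j = (k : Int) ∧ terms[k] = t := by
  unfold colsB
  rw [colsB_getD_aux]
  simp only [PySem.Dict.getD_empty, List.nil_append, List.mem_map, List.mem_filter,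
    PySem.List.mem_enumerate_iff]
  constructor
  · rintro ⟨p, ⟨⟨k, hk, rfl⟩, ht⟩, rfl⟩
    exact ⟨k, hk, by simp, by simpa using ht⟩
  · rintro ⟨k, hk, rfl, ht⟩
    exact ⟨((k : Int), terms[k]), ⟨⟨k, hk, by simp⟩, by simp [ht]⟩, rfl⟩

-- lengths are preserved by the scatter loops
theorem length_foldl_pySetD (o : Int) (L : List Int) (row : List Int) :
    (L.foldl (fun r j => PySem.List.pySetD r j o) row).length = row.length := by
  induction L generalizing row with
  | nil => rfl
  | cons j L ih => simp [List.foldl_cons, ih, PySem.List.length_pySetD]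

-- length of the foldr form of the scatter loop
theorem length_scatter_foldr (cols : PySem.Dict String (List Int))
    (pairs : List (String × Int)) (row : List Int) :
    (pairs.foldr (fun p row => (cols.getD p.1 []).foldl
        (fun r j => PySem.List.pySetD r j p.2) row) row).length = row.length := by
  induction pairs with
  | nil => rfl
  | cons q qs ihq => simp [List.foldr_cons, length_foldl_pySetD, ihq]

-- first-match scan as an Option, for the induction
def frecScan? (pairs : List (String × Int)) (term : String) : Option Int :=
  match pairs with
  | [] => none
  | (t, o) :: rest => if term == t then some o else frecScan? rest term

theorem frecScanA_eq_scan? (pairs : List (String × Int)) (term : String) :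
    frecScanA pairs term = (frecScan? pairs term).getD 0 := by
  induction pairs with
  | nil => rfl
  | cons p rest ih =>
    obtain ⟨t, o⟩ := p
    simp only [frecScanA, frecScan?]
    split <;> simp [ih]

-- one scatter pass over the column list of t, read back at column k
theorem foldl_pySetD_getD (o : Int) (k : Nat) (L : List Int) (row : List Int)
    (hL : ∀ j ∈ L, ∃ m : Nat, j = (m : Int) ∧ m < row.length) :
    PySem.List.pyGetD (L.foldl (fun r j => PySem.List.pySetD r j o) row) (k : Int) 0
      = if (k : Int) ∈ L then o else PySem.List.pyGetD row (k : Int) 0 := by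
  induction L generalizing row with
  | nil => simp
  | cons j L ih =>
    obtain ⟨m, rfl, hm⟩ := hL j (by simp)
    simp only [List.foldl_cons]
    rw [ih _ (fun j hj => by
      obtain ⟨m', h1, h2⟩ := hL j (by simp [hj])
      exact ⟨m', h1, by simpa [PySem.List.length_pySetD] using h2⟩)]
    by_cases hmem : (k : Int) ∈ L
    · simp [hmem]
    · simp only [hmem, if_false, List.mem_cons]
      rw [PySem.List.pySetD_natCast]
      by_cases hk : k = m
      · subst hk
        simp [PySem.List.pyGetD, PySem.List.pyIdx?, PySem.List.pyGet?, hm]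
      · by_cases hkr : k < row.length
        · simp [PySem.List.pyGetD, PySem.List.pyIdx?, PySem.List.pyGet?, hkr, hm,
            List.getElem?_set]
          rw [if_neg fun h => hk h.symm, Option.getD_some, if_neg hk]
        · simp [PySem.List.pyGetD, PySem.List.pyIdx?, PySem.List.pyGet?, hkr]
          exact fun h => absurd h hk

-- the scattered row read back at k is A's first-match scan at terms[k]
theorem scatterB_getD (terms : List String) (pairs : List (String × Int)) (k : Nat)
    (hk : k < terms.length) :
    PySem.List.pyGetD (scatterB (colsB terms) terms.length pairs) (k : Int) 0
      = frecScanA pairs terms[k] := by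
  unfold scatterB
  rw [List.foldl_reverse, frecScanA_eq_scan?]
  induction pairs with
  | nil => simp [frecScan?, PySem.List.pyGetD, PySem.List.pyIdx?, PySem.List.pyGet?,
      List.getElem?_replicate, hk]
  | cons p rest ih =>
    obtain ⟨t, o⟩ := p
    simp only [List.foldr_cons, frecScan?]
    rw [foldl_pySetD_getD o k _ _ (fun j hj => by
      obtain ⟨m, hm, rfl, _⟩ := (mem_colsB terms t j).1 hj
      exact ⟨m, rfl, by rw [length_scatter_foldr]; simpa using hm⟩)]
    by_cases ht : terms[k] = t
    · have : (k : Int) ∈ (colsB terms).getD t [] := (mem_colsB terms t _).2 ⟨k, hk, rfl, ht⟩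
      simp [this, ht]
    · have : ¬ (k : Int) ∈ (colsB terms).getD t [] := by
        intro h
        obtain ⟨m, hm, hjm, htm⟩ := (mem_colsB terms t _).1 h
        have : m = k := by exact_mod_cast hjm.symm
        exact ht (this ▸ htm)
      simp only [this, if_false, beq_iff_eq, ht, if_false]
      exact ih

theorem length_scatterB (terms : List String) (pairs : List (String × Int)) :
    (scatterB (colsB terms) terms.length pairs).length = terms.length := by
  unfold scatterB
  rw [List.foldl_reverse, length_scatter_foldr]
  simp

-- the whole row equals A's gathered row
theorem scatterB_eq_map (terms : List String) (pairs : List (String × Int)) :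
    scatterB (colsB terms) terms.length pairs = terms.map (fun term => frecScanA pairs term) := by
  apply List.ext_getElem
  · simp [length_scatterB]
  · intro k h1 h2
    have hk : k < terms.length := by simpa [length_scatterB] using h1
    have h := scatterB_getD terms pairs k hk
    rw [show PySem.List.pyGetD (scatterB (colsB terms) terms.length pairs) ((k : Nat) : Int) 0
        = (scatterB (colsB terms) terms.length pairs)[k] from by
      simp [PySem.List.pyGetD, PySem.List.pyIdx?, PySem.List.pyGet?, h1]] at h
    simp [h]

-- A's inner loop with two appended accumulators is the pair of row maps
theorem frec_inner_pair (f g : String → Int) (terms : List String) :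
    terms.foldl (fun (tt : List Int × List Int) term => (tt.1 ++ [f term], tt.2 ++ [g term])) ([], [])
      = (terms.map f, terms.map g) := by
  rw [PySem.List.foldl_prod_mk (f := fun a t => a ++ [f t]) (g := fun a t => a ++ [g t])]
  simp only [PySem.List.foldl_append_singleton_eq_map, List.nil_append]

-- ===== VERDICT (by name: the statement is the Claim_ definition above) =====
theorem frec_ij_spec : Claim_equal_frec_ij := by
  intro terms dic _
  unfold Spec_frec_ij frec_ij frec_ij_alt
  simp only [frec_inner_pair]
  rw [PySem.List.foldl_prod_mk
      (f := fun (r : List (List Int)) key =>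
        r ++ [terms.map (fun term => frecScanA ((PySem.Dict.ofList dic).getD key []) term)])
      (g := fun (m : List (List Int)) key =>
        m ++ [terms.map (fun term => if frecScanA ((PySem.Dict.ofList dic).getD key []) term > 0 then (1 : Int) else 0)])]
  rw [PySem.Dict.values_eq_map_keys _ (PySem.Dict.nodup_keys_ofList dic) []]
  simp only [PySem.List.foldl_append_singleton_eq_map, List.nil_append, List.foldl_map,
    scatterB_eq_map, List.map_map, Function.comp_def]
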